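-- pv_equiv track=rewrite | github.com/david-arias-lentesplus/promo-tracker | api/analytics.py | _get_unique_fabricantes
-- ===== SOURCE A (Python) =====
-- def _get_unique_fabricantes(records: list) -> list:
--     seen = set()
--     out  = []
--     for r in records:
--         f = r.get('fabricante', '')
--         if f and f not in seen:
--             seen.add(f)
--             out.append(f)
--     return sorted(out)
-- ===== SOURCE B (Python) =====
-- def _get_unique_fabricantes(records: list) -> list:
--     vals = sorted(f for r in records if (f := r.get('fabricante', '')))
--     out = []
--     prev = None
--     for v in vals:
--         if v != prev:
--             out.append(v)
--             prev = v
--     return out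
-- ===== Notes on version B (the rewrite author's own statement) =====
-- stated objective: alternative
-- what changed: Replaces the hash-set/insertion-order dedup-then-sort with sort-first and a single adjacent-scan dedup keeping values that differ from the previous one; no set and no membership test remain.
import Mathlib
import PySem

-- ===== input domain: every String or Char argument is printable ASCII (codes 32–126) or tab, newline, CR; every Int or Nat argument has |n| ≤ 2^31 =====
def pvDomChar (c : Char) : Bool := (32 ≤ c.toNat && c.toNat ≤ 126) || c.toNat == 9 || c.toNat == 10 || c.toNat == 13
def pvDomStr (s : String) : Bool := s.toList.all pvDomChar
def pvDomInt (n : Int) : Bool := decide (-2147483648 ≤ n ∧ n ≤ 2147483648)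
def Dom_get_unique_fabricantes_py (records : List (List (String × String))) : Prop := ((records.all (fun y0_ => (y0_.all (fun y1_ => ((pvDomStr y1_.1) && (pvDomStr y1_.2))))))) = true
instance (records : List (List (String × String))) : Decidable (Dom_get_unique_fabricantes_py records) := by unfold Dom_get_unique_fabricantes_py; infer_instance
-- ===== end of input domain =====

-- B replaces A's hash-set + insertion-order list dedup (then sort) by sort-first then an
-- adjacent-scan dedup keeping each value that differs from the previous one (objective: alternative).

-- ===== PORT A =====
def get_unique_fabricantes_py (records : List (List (String × String))) : List String :=
  -- seen = set(); out = []; for r in records: f = r.get('fabricante',''); if f and f not in seen: seen.add(f); out.append(f)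
  let st := records.foldl
    (fun (p : PySem.Set String × List String) r =>
      let f := PySem.Dict.getD (PySem.Dict.mk r) "fabricante" ""
      if f ≠ "" ∧ ¬ (PySem.Set.contains p.1 f = true) then
        (PySem.Set.add p.1 f, p.2 ++ [f])
      else p)
    (PySem.Set.empty, [])
  PySem.List.sorted st.2 (fun x => x) false

-- ===== PORT B =====
def get_unique_fabricantes_py_alt (records : List (List (String × String))) : List String :=
  -- vals = sorted(f for r in records if (f := r.get('fabricante','')))
  let vals := PySem.List.sorted
    (records.filterMap (fun r =>
      let f := PySem.Dict.getD (PySem.Dict.mk r) "fabricante" ""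
      if f ≠ "" then some f else none))
    (fun x => x) false
  -- out = []; prev = None; for v in vals: if v != prev: out.append(v); prev = v
  let st := vals.foldl
    (fun (p : List String × Option String) v =>
      if some v ≠ p.2 then (p.1 ++ [v], some v) else p)
    ([], none)
  st.1

-- ===== PRECONDITION & SPEC =====
def Spec_get_unique_fabricantes_py (records : List (List (String × String))) (out : List String) : Prop := out = get_unique_fabricantes_py_alt records
instance (records : List (List (String × String))) (out : List String) : Decidable (Spec_get_unique_fabricantes_py records out) := by unfold Spec_get_unique_fabricantes_py; infer_instance

-- ===== CLAIM (what is proved, stated in full; the proofs are below) =====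
def Claim_equal_get_unique_fabricantes_py : Prop := ∀ (records : List (List (String × String))), Dom_get_unique_fabricantes_py records → Spec_get_unique_fabricantes_py records (get_unique_fabricantes_py records)

-- ===== LEMMAS AND PROOFS =====

-- the filtered values, shared vocabulary of the proofs
def pvVals (records : List (List (String × String))) : List String :=
  records.filterMap (fun r =>
    let f := PySem.Dict.getD (PySem.Dict.mk r) "fabricante" ""
    if f ≠ "" then some f else none)

theorem loopA_eq (records : List (List (String × String))) (s : List String) :
    (records.foldl
      (fun (p : PySem.Set String × List String) r =>
        let f := PySem.Dict.getD (PySem.Dict.mk r) "fabricante" ""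
        if f ≠ "" ∧ ¬ (PySem.Set.contains p.1 f = true) then
          (PySem.Set.add p.1 f, p.2 ++ [f])
        else p)
      (s, s)) = ((pvVals records).foldl PySem.Set.add s, (pvVals records).foldl PySem.Set.add s) := by
  induction records generalizing s with
  | nil => simp [pvVals]
  | cons r t ih =>
    have hv : pvVals (r :: t) =
        (if PySem.Dict.getD (PySem.Dict.mk r) "fabricante" "" ≠ "" then
          PySem.Dict.getD (PySem.Dict.mk r) "fabricante" "" :: pvVals t else pvVals t) := by
      by_cases hg : PySem.Dict.getD (PySem.Dict.mk r) "fabricante" "" ≠ "" <;> simp [pvVals, hg]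
    rw [List.foldl_cons, hv]
    show (List.foldl _
      (if PySem.Dict.getD (PySem.Dict.mk r) "fabricante" "" ≠ "" ∧
          ¬ (PySem.Set.contains s (PySem.Dict.getD (PySem.Dict.mk r) "fabricante" "") = true) then
          (PySem.Set.add s (PySem.Dict.getD (PySem.Dict.mk r) "fabricante" ""),
           s ++ [PySem.Dict.getD (PySem.Dict.mk r) "fabricante" ""])
        else (s, s)) t) = _
    by_cases hf : PySem.Dict.getD (PySem.Dict.mk r) "fabricante" "" ≠ ""
    · rw [if_pos hf]
      by_cases hc : PySem.Dict.getD (PySem.Dict.mk r) "fabricante" "" ∈ s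
      · rw [if_neg (by simp [hf, PySem.Set.contains, hc]), ih, List.foldl_cons,
          show PySem.Set.add s (PySem.Dict.getD (PySem.Dict.mk r) "fabricante" "") = s by
            simp [PySem.Set.add, PySem.Set.contains, hc]]
      · have hadd : PySem.Set.add s (PySem.Dict.getD (PySem.Dict.mk r) "fabricante" "")
            = s ++ [PySem.Dict.getD (PySem.Dict.mk r) "fabricante" ""] := by
          simp [PySem.Set.add, PySem.Set.contains, hc]
        rw [if_pos ⟨hf, by simp [PySem.Set.contains, hc]⟩, hadd, ih, List.foldl_cons, hadd]
    · rw [if_neg hf, if_neg (by simp [hf]), ih]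

-- B's scan-with-previous as a structural recursion
def dedupFrom (p : Option String) : List String → List String
  | [] => []
  | x :: t => if some x ≠ p then x :: dedupFrom (some x) t else dedupFrom p t

theorem loopB_eq (l : List String) (out : List String) (p : Option String) :
    (l.foldl
      (fun (q : List String × Option String) v =>
        if some v ≠ q.2 then (q.1 ++ [v], some v) else q)
      (out, p)).1 = out ++ dedupFrom p l := by
  induction l generalizing out p with
  | nil => simp [dedupFrom]
  | cons x t ih =>
    rw [List.foldl_cons]
    show (List.foldl _ (if some x ≠ p then (out ++ [x], some x) else (out, p)) t).1 = _
    by_cases h : some x = p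
    · rw [if_neg (by simp [h]), ih]
      simp [dedupFrom, h]
    · rw [if_pos h, ih]
      simp [dedupFrom, h]

-- on a sorted list whose elements all dominate p, the scan yields a strictly increasing
-- list containing exactly the elements ≠ p
theorem dedupFrom_spec (l : List String) (hl : l.Pairwise (· ≤ ·))
    (p : Option String) (hp : ∀ a, p = some a → ∀ y ∈ l, a ≤ y) :
    (dedupFrom p l).Pairwise (· < ·) ∧ (∀ x, x ∈ dedupFrom p l ↔ x ∈ l ∧ some x ≠ p) := by
  induction l generalizing p with
  | nil => simp [dedupFrom]
  | cons x t ih =>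
    have hx : ∀ y ∈ t, x ≤ y := fun y hy => (List.pairwise_cons.mp hl).1 y hy
    have ht : t.Pairwise (· ≤ ·) := (List.pairwise_cons.mp hl).2
    by_cases h : some x = p
    · have ihp := ih ht p (by
        intro a ha y hy
        obtain rfl : x = a := Option.some.inj (h.trans ha)
        exact hx y hy)
      simp only [dedupFrom, h, ne_eq, not_true_eq_false, if_false]
      refine ⟨ihp.1, fun z => ?_⟩
      rw [ihp.2 z]
      constructor
      · rintro ⟨hz, hzp⟩; exact ⟨List.mem_cons_of_mem _ hz, hzp⟩
      · rintro ⟨hz, hzp⟩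
        rcases List.mem_cons.mp hz with rfl | hz
        · exact absurd h hzp
        · exact ⟨hz, hzp⟩
    · have ihp := ih ht (some x) (by
        intro a ha y hy
        obtain rfl : x = a := Option.some.inj ha
        exact hx y hy)
      simp only [dedupFrom, h, ne_eq, not_false_iff, if_true]
      constructor
      · refine List.pairwise_cons.mpr ⟨?_, ihp.1⟩
        intro z hz
        have hm := (ihp.2 z).mp hz
        have hzx : z ≠ x := fun e => hm.2 (by rw [e])
        exact lt_of_le_of_ne (hx z hm.1) (Ne.symm hzx)
      · intro z
        rw [List.mem_cons, ihp.2 z]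
        constructor
        · rintro (rfl | ⟨hz, hzx⟩)
          · exact ⟨List.mem_cons_self, h⟩
          · refine ⟨List.mem_cons_of_mem _ hz, ?_⟩
            intro e
            cases p with
            | none => exact Option.some_ne_none z e
            | some a =>
              have hax : a ≤ x := hp a rfl x List.mem_cons_self
              have hxz : x ≤ z := hx z hz
              have hza : z = a := Option.some.inj e
              have hzx' : z ≤ x := hza ▸ hax
              exact hzx (congrArg some (le_antisymm hxz hzx').symm)
        · rintro ⟨hz, hzp⟩
          rcases List.mem_cons.mp hz with rfl | hz
          · exact Or.inl rfl
          · by_cases hzx : z = x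
            · exact Or.inl hzx
            · exact Or.inr ⟨hz, fun e => hzx (Option.some.inj e)⟩

-- ===== VERDICT (by name: the statement is the Claim_ definition above) =====
theorem get_unique_fabricantes_py_spec : Claim_equal_get_unique_fabricantes_py := by
  intro records _
  show get_unique_fabricantes_py records = get_unique_fabricantes_py_alt records
  unfold get_unique_fabricantes_py get_unique_fabricantes_py_alt
  rw [show (PySem.Set.empty : PySem.Set String) = ([] : List String) from rfl]
  rw [loopA_eq records []]
  rw [loopB_eq]
  rw [List.nil_append]
  have hsorted := PySem.List.sorted_pairwise (xs := pvVals records) (key := fun x => x)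
  have hspec := dedupFrom_spec (PySem.List.sorted (pvVals records) (fun x => x) false)
      hsorted none (by intro a ha; exact absurd ha (by simp))
  have hofl : (pvVals records).foldl PySem.Set.add [] = PySem.Set.ofList (pvVals records) :=
    (PySem.Set.ofList_eq_foldl _).symm
  rw [show records.filterMap (fun r =>
      let f := PySem.Dict.getD (PySem.Dict.mk r) "fabricante" ""
      if f ≠ "" then some f else none) = pvVals records from rfl]
  rw [hofl]
  apply PySem.List.sorted_eq_of_perm_of_pairwise_lt
  · -- perm
    apply (List.perm_ext_iff_of_nodup ?_ ?_).mpr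
    · intro z
      rw [(hspec.2 z)]
      simp [PySem.Set.mem_ofList, PySem.List.mem_sorted]
    · exact hspec.1.imp (fun h => ne_of_lt h)
    · exact PySem.Set.nodup_ofList _
  · exact hspec.1
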